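-- pv_equiv track=rewrite | github.com/billwpierce/advent-of-code | 2020/code_d10.py | helper
-- ===== SOURCE A (Python) =====
-- def helper(curr, lst):
--     if curr+1 in lst:
--         tmp = helper(curr+1, lst)
--         tmp[0] = tmp[0] + 1
--         return tmp
--     if curr+2 in lst:
--         tmp = helper(curr+2, lst)
--         tmp[1] = tmp[1] + 1
--         return tmp
--     if curr+3 in lst:
--         tmp = helper(curr+3, lst)
--         tmp[2] = tmp[2] + 1
--         return tmp
--     return [0, 0, 0]
-- ===== SOURCE B (Python) =====
-- def helper(curr, lst):
--     ones = twos = threes = 0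
--     pos = curr
--     while True:
--         if pos + 1 in lst:
--             ones += 1
--             pos += 1
--         elif pos + 2 in lst:
--             twos += 1
--             pos += 2
--         elif pos + 3 in lst:
--             threes += 1
--             pos += 3
--         else:
--             return [ones, twos, threes]
-- ===== Notes on version B (the rewrite author's own statement) =====
-- stated objective: simpler
-- what changed: Replaces A's non-tail recursion (which mutates the returned list on the way back up) by a flat iterative loop that walks the chain once with an accumulator of three counters.
import Mathlib
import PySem

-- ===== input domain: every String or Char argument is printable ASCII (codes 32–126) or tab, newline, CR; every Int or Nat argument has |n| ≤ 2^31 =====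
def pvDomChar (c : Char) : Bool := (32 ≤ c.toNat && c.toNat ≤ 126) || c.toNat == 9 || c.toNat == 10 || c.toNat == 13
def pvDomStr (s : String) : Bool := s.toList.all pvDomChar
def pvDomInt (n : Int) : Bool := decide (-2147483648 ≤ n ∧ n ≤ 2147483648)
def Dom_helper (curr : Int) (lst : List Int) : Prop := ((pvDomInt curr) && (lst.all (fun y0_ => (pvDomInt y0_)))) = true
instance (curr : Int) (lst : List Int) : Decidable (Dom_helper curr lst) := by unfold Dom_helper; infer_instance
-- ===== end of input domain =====

-- B replaces A's non-tail recursion (which mutates the returned list on the way back) by a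
-- flat iterative walk with three counter accumulators; objective: simpler (same cost).

-- termination measure fact used by both ports (cited in decreasing_by)
theorem pvStepLt (curr k : Int) (hk : 0 < k) (lst : List Int) (h : curr + k ∈ lst) :
    (lst.filter (fun x => decide (curr + k < x))).length
      < (lst.filter (fun x => decide (curr < x))).length := by
  have himp : ∀ x : Int, decide (curr + k < x) → decide (curr < x) := by
    intro x hx
    simp only [decide_eq_true_eq] at *
    omega
  induction lst with
  | nil => simp at h
  | cons a t ih =>
    have hmono : (t.filter (fun x => decide (curr + k < x))).length
        ≤ (t.filter (fun x => decide (curr < x))).length :=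
      (List.monotone_filter_right t himp).length_le
    rcases List.mem_cons.mp h with rfl | ha
    · have h1 : ¬ (curr + k < curr + k) := by omega
      have h2 : curr < curr + k := by omega
      simp only [List.filter_cons, h1, h2, decide_true, decide_false,
        Bool.false_eq_true, if_false, if_true, List.length_cons]
      omega
    · have hlt := ih ha
      by_cases hqa : curr < a
      · by_cases hpa : curr + k < a <;>
          simp only [List.filter_cons, hqa, hpa, decide_true, decide_false,
            Bool.false_eq_true, if_false, if_true, List.length_cons] <;> omega
      · have hpa : ¬ (curr + k < a) := by omega
        simp only [List.filter_cons, hqa, hpa, decide_false, Bool.false_eq_true, if_false]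
        omega

-- ===== PORT A =====
-- tmp[0] read/write: tmp always has length 3 and the index is a literal in range, so
-- List.set / getD are exact here.
def helper (curr : Int) (lst : List Int) : List Int :=
  if h1 : curr + 1 ∈ lst then
    let tmp := helper (curr + 1) lst
    tmp.set 0 (tmp[0]?.getD 0 + 1)
  else if h2 : curr + 2 ∈ lst then
    let tmp := helper (curr + 2) lst
    tmp.set 1 (tmp[1]?.getD 0 + 1)
  else if h3 : curr + 3 ∈ lst then
    let tmp := helper (curr + 3) lst
    tmp.set 2 (tmp[2]?.getD 0 + 1)
  else [0, 0, 0]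
termination_by (lst.filter (fun x => decide (curr < x))).length
decreasing_by
  · exact pvStepLt curr 1 (by omega) lst h1
  · exact pvStepLt curr 2 (by omega) lst h2
  · exact pvStepLt curr 3 (by omega) lst h3

-- ===== PORT B =====
def helperAltGo (ones twos threes pos : Int) (lst : List Int) : List Int :=
  if h1 : pos + 1 ∈ lst then helperAltGo (ones + 1) twos threes (pos + 1) lst
  else if h2 : pos + 2 ∈ lst then helperAltGo ones (twos + 1) threes (pos + 2) lst
  else if h3 : pos + 3 ∈ lst then helperAltGo ones twos (threes + 1) (pos + 3) lst
  else [ones, twos, threes]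
termination_by (lst.filter (fun x => decide (pos < x))).length
decreasing_by
  · exact pvStepLt pos 1 (by omega) lst h1
  · exact pvStepLt pos 2 (by omega) lst h2
  · exact pvStepLt pos 3 (by omega) lst h3

def helper_alt (curr : Int) (lst : List Int) : List Int :=
  helperAltGo 0 0 0 curr lst

-- ===== PRECONDITION & SPEC =====
def Spec_helper (curr : Int) (lst : List Int) (out : List Int) : Prop := out = helper_alt curr lst
instance (curr : Int) (lst : List Int) (out : List Int) : Decidable (Spec_helper curr lst out) := by unfold Spec_helper; infer_instance

-- ===== CLAIM (what is proved, stated in full; the proofs are below) =====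
def Claim_equal_helper : Prop := ∀ (curr : Int) (lst : List Int), Dom_helper curr lst → Spec_helper curr lst (helper curr lst)

-- ===== LEMMAS AND PROOFS =====

theorem helper_shape (curr : Int) (lst : List Int) :
    ∃ a b c : Int, helper curr lst = [a, b, c] := by
  fun_induction helper curr lst with
  | case1 pos hmem tmp ih =>
    obtain ⟨a, b, c, hs⟩ := ih
    exact ⟨a + 1, b, c, by simp [tmp, hs]⟩
  | case2 pos h1 h2 tmp ih =>
    obtain ⟨a, b, c, hs⟩ := ih
    exact ⟨a, b + 1, c, by simp [tmp, hs]⟩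
  | case3 pos h1 h2 h3 tmp ih =>
    obtain ⟨a, b, c, hs⟩ := ih
    exact ⟨a, b, c + 1, by simp [tmp, hs]⟩
  | case4 pos h1 h2 h3 =>
    exact ⟨0, 0, 0, rfl⟩

theorem go_eq (lst : List Int) (pos : Int) :
    ∀ ones twos threes : Int,
      helperAltGo ones twos threes pos lst
        = List.zipWith (· + ·) [ones, twos, threes] (helper pos lst) := by
  suffices H : ∀ n pos', (lst.filter (fun x => decide (pos' < x))).length = n →
      ∀ o t th : Int, helperAltGo o t th pos' lst
        = List.zipWith (· + ·) [o, t, th] (helper pos' lst) from H _ pos rfl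
  intro n
  induction n using Nat.strong_induction_on with
  | _ n ih =>
    intro pos hm o t th
    by_cases h1 : pos + 1 ∈ lst
    · obtain ⟨a, b, c, hs⟩ := helper_shape (pos + 1) lst
      rw [helperAltGo]
      simp only [h1, dif_pos]
      rw [ih _ (hm ▸ pvStepLt pos 1 (by omega) lst h1) (pos + 1) rfl]
      conv_rhs => rw [helper]
      simp only [h1, dif_pos, hs]
      simp
      ring
    · by_cases h2 : pos + 2 ∈ lst
      · obtain ⟨a, b, c, hs⟩ := helper_shape (pos + 2) lst
        rw [helperAltGo]
        simp only [h1, h2, dif_pos]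
        rw [ih _ (hm ▸ pvStepLt pos 2 (by omega) lst h2) (pos + 2) rfl]
        conv_rhs => rw [helper]
        simp only [h1, h2, dif_pos, hs]
        simp
        ring
      · by_cases h3 : pos + 3 ∈ lst
        · obtain ⟨a, b, c, hs⟩ := helper_shape (pos + 3) lst
          rw [helperAltGo]
          simp only [h1, h2, h3, dif_pos]
          rw [ih _ (hm ▸ pvStepLt pos 3 (by omega) lst h3) (pos + 3) rfl]
          conv_rhs => rw [helper]
          simp only [h1, h2, h3, dif_pos, hs]
          simp
          ring
        · rw [helperAltGo, helper]
          simp [h1, h2, h3]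

-- ===== VERDICT (by name: the statement is the Claim_ definition above) =====
theorem helper_spec : Claim_equal_helper := by
  intro curr lst _
  unfold Spec_helper helper_alt
  rw [go_eq]
  obtain ⟨a, b, c, hs⟩ := helper_shape curr lst
  simp [hs]
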